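-- pv_equiv track=rewrite | github.com/BoxiLi/Hiq-code | my_optimize.py | sublist_finder
-- ===== SOURCE A (Python) =====
-- def sublist_finder(mylist, opt_dict):
--     for i in range(len(mylist)):
--         for pattern in opt_dict:
--             num_ele = len(pattern)
--             if mylist[i] == pattern[0] and tuple(mylist[i:i+num_ele]) == pattern:
--                 pos = list(range(i, i+num_ele))
--                 return pos, opt_dict[pattern]
--     return [],[]
-- ===== SOURCE B (Python) =====
-- def sublist_finder(mylist, opt_dict):
--     # Pattern-major scan: for each pattern find its earliest occurrence, only
--     # searching start positions strictly below the best found so far (ties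
--     # keep the earlier dict entry).
--     best_start, best = len(mylist), ([], [])
--     for pattern, val in opt_dict.items():
--         m = len(pattern)
--         for s in range(best_start):
--             if tuple(mylist[s:s + m]) == pattern:
--                 best_start, best = s, (list(range(s, s + m)), val)
--                 break
--     return best
-- ===== Notes on version B (the rewrite author's own statement) =====
-- stated objective: alternative
-- what changed: A scans position-major (for each list position, try every dict pattern and return on the first hit); B is pattern-major: a single pass over the dict that finds each pattern's earliest occurrence while only searching start positions strictly below the best found so far, ties keeping the earlier dict entry.
import Mathlib
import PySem

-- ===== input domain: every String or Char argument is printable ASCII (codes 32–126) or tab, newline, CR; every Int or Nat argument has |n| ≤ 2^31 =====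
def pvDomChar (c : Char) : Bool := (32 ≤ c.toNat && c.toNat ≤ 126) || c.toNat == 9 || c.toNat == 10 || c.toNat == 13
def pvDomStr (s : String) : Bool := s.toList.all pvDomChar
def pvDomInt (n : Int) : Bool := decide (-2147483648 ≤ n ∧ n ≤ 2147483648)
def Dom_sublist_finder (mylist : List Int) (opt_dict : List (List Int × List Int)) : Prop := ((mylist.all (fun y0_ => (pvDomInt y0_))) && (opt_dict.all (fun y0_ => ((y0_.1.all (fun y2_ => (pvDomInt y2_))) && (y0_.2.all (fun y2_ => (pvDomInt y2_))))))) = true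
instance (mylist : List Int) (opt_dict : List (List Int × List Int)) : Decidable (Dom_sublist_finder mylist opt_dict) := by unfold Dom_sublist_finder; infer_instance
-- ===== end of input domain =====

-- B replaces A's position-major double scan by a single pattern-major pass whose
-- search window shrinks to the best start found so far (same return value everywhere A returns).

-- ===== PORT A =====
-- inner 'for pattern in opt_dict' loop at position i; some none = no pattern matched here,
-- some (some r) = return r, none = IndexError (pattern[0] on an empty pattern key)
def pvAInner (mylist : List Int) (full : List (List Int × List Int)) (i : Int) :
    List (List Int × List Int) → Option (Option (List Int × List Int))
  | [] => some none
  | pv :: rest =>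
    match PySem.List.pyGet? pv.1 0 with
    | none => none
    | some h =>
      match PySem.List.pyGet? mylist i with
      | none => none
      | some x =>
        if x = h then
          if PySem.List.slice mylist (some i) (some (i + (pv.1.length : Int))) = pv.1 then
            some (some (PySem.List.pyRange i (i + (pv.1.length : Int)) 1,
                        (PySem.Dict.get? ⟨full⟩ pv.1).getD []))
          else pvAInner mylist full i rest
        else pvAInner mylist full i rest

-- outer 'for i in range(len(mylist))' loop
def pvAOuter (mylist : List Int) (full : List (List Int × List Int)) :
    List Int → Option (List Int × List Int)
  | [] => some ([], [])
  | i :: rest =>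
    match pvAInner mylist full i full with
    | none => none
    | some (some r) => some r
    | some none => pvAOuter mylist full rest

def sublist_finder (mylist : List Int) (opt_dict : List (List Int × List Int)) :
    List Int × List Int :=
  (pvAOuter mylist opt_dict (PySem.List.pyRange 0 (mylist.length : Int) 1)).getD ([], [])

-- ===== PORT B =====
def sublist_finder_alt (mylist : List Int) (opt_dict : List (List Int × List Int)) :
    List Int × List Int :=
  (opt_dict.foldl
    (fun acc pv =>
      match (List.range acc.1).find?
          (fun (s : Nat) => PySem.List.slice mylist (some (s : Int)) (some ((s : Int) + (pv.1.length : Int))) == pv.1) with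
      | some s => (s, (PySem.List.pyRange (s : Int) ((s : Int) + (pv.1.length : Int)) 1, pv.2))
      | none => acc)
    (mylist.length, (([] : List Int), ([] : List Int)))).2

-- ===== PRECONDITION & SPEC =====
-- Pre_ excludes exactly the inputs where A raises IndexError: mylist nonempty, some key is the
-- empty list, and no key before the first empty key is a prefix of mylist (then 'pattern[0]' is
-- evaluated on the empty pattern at position 0 before any match can return).
def Pre_sublist_finder (mylist : List Int) (opt_dict : List (List Int × List Int)) : Prop :=
  mylist = [] ∨ (∀ pv ∈ opt_dict, pv.1 ≠ []) ∨
    ((opt_dict.takeWhile (fun q => !q.1.isEmpty)).any (fun q => q.1.isPrefixOf mylist) = true)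
instance (mylist : List Int) (opt_dict : List (List Int × List Int)) :
    Decidable (Pre_sublist_finder mylist opt_dict) := by unfold Pre_sublist_finder; infer_instance

def pvWitness_sublist_finder : List Int × (List (List Int × List Int)) :=
  ([1, 2, 3], [([2, 3], [7]), ([1], [9])])

def Spec_sublist_finder (mylist : List Int) (opt_dict : List (List Int × List Int))
    (out : List Int × List Int) : Prop := out = sublist_finder_alt mylist opt_dict
instance (mylist : List Int) (opt_dict : List (List Int × List Int)) (out : List Int × List Int) :
    Decidable (Spec_sublist_finder mylist opt_dict out) := by unfold Spec_sublist_finder; infer_instance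

-- ===== CLAIM (what is proved, stated in full; the proofs are below) =====
def Claim_equal_sublist_finder : Prop := ∀ (mylist : List Int) (opt_dict : List (List Int × List Int)), Dom_sublist_finder mylist opt_dict → Pre_sublist_finder mylist opt_dict → Spec_sublist_finder mylist opt_dict (sublist_finder mylist opt_dict)

-- ===== LEMMAS AND PROOFS =====

-- 'pattern p occurs at start s' (tuple(mylist[s:s+len(p)]) == p, Nat start)
def pvM (mylist p : List Int) (s : Nat) : Bool := (mylist.drop s).take p.length == p

def pvMk (pv : List Int × List Int) (i : Nat) : List Int × List Int :=
  (PySem.List.pyRange (i : Int) ((i : Int) + (pv.1.length : Int)) 1, pv.2)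

-- reference result: first start in `is` where some pattern of d occurs; first such pattern wins
def pvRef (mylist : List Int) (d : List (List Int × List Int)) (is : List Nat)
    (r : List Int × List Int) : List Int × List Int :=
  match is.find? (fun i => d.any (fun pv => pvM mylist pv.1 i)) with
  | some i =>
    match d.find? (fun pv => pvM mylist pv.1 i) with
    | some pv => pvMk pv i
    | none => r
  | none => r

lemma pv_find?_range_some (p : Nat → Bool) (b : Nat) : ∀ s,
    (List.range b).find? p = some s ↔ s < b ∧ p s = true ∧ ∀ t < s, p t = false := by
  induction b with
  | zero => simp
  | succ b ih =>
    intro s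
    rw [List.range_succ, List.find?_append]
    rcases hf : (List.range b).find? p with _ | s'
    · have hall : ∀ t < b, p t = false := by
        rw [List.find?_eq_none] at hf
        intro t ht; simpa using hf t (List.mem_range.mpr ht)
      by_cases hb : p b = true
      · simp only [Option.or, List.find?_singleton, hb]
        constructor
        · rintro h; cases h
          exact ⟨Nat.lt_succ_self _, hb, fun t ht => hall t (by omega)⟩
        · rintro ⟨h1, h2, h3⟩
          have : s = b := by
            by_contra hne
            have hlt : s < b := by omega
            have := hall s hlt
            simp [this] at h2
          simp [this]
      · have hb' : p b = false := by simpa using hb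
        simp only [Option.or, List.find?_singleton, hb']
        rw [if_neg (by simp)]
        constructor
        · intro h; cases h
        · rintro ⟨h1, h2, h3⟩
          exfalso
          rcases Nat.lt_succ_iff_lt_or_eq.mp h1 with h | h
          · have := hall s h; simp [this] at h2
          · subst h; simp [hb'] at h2
    · have hs' := (ih s').mp hf
      simp only [Option.or]
      constructor
      · rintro h; cases h
        exact ⟨by omega, hs'.2.1, hs'.2.2⟩
      · rintro ⟨h1, h2, h3⟩
        have hss : s' = s := by
          rcases hs' with ⟨ha, hb2, hc⟩
          by_contra hne
          rcases Nat.lt_or_ge s' s with h | h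
          · have := h3 s' h; simp [this] at hb2
          · have hlt : s < s' := by omega
            have := hc s hlt; simp [this] at h2
        simp [hss]

lemma pv_find?_range_none (p : Nat → Bool) (b : Nat) :
    (List.range b).find? p = none ↔ ∀ t < b, p t = false := by
  rw [List.find?_eq_none]
  constructor
  · intro h t ht; simpa using h t (List.mem_range.mpr ht)
  · intro h t ht; simp [h t (List.mem_range.mp ht)]

lemma pv_find?_congr {α : Type} {l : List α} {p q : α → Bool}
    (h : ∀ x ∈ l, p x = q x) : l.find? p = l.find? q := by
  induction l with
  | nil => rfl
  | cons x t ih =>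
    have hx := h x (by simp)
    simp only [List.find?_cons, hx]
    cases q x <;> simp [ih (fun y hy => h y (by simp [hy]))]

lemma pv_slice_pred (mylist p : List Int) :
    (fun (s : Nat) => PySem.List.slice mylist (some (s : Int)) (some ((s : Int) + (p.length : Int))) == p)
      = pvM mylist p := by
  funext s
  simp [pvM, PySem.List.slice_natCast_add]

lemma pvRef_cons_none (mylist : List Int) (pv : List Int × List Int)
    (rest : List (List Int × List Int)) (b : Nat) (r : List Int × List Int)
    (hno : ∀ t < b, pvM mylist pv.1 t = false) :
    pvRef mylist (pv :: rest) (List.range b) r = pvRef mylist rest (List.range b) r := by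
  unfold pvRef
  have hcong : (List.range b).find? (fun i => (pv :: rest).any (fun q => pvM mylist q.1 i))
      = (List.range b).find? (fun i => rest.any (fun q => pvM mylist q.1 i)) :=
    pv_find?_congr (by intro i hi; simp [List.any_cons, hno i (List.mem_range.mp hi)])
  rw [hcong]
  rcases hf : (List.range b).find? (fun i => rest.any (fun q => pvM mylist q.1 i)) with _ | i
  · rfl
  · simp only []
    rw [List.find?_cons_of_neg (p := fun q => pvM mylist q.1 i) (a := pv) (l := rest)
      (by simp [hno i ((pv_find?_range_some _ _ i).mp hf).1])]

lemma pvRef_cons_some (mylist : List Int) (pv : List Int × List Int)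
    (rest : List (List Int × List Int)) (b s : Nat) (r : List Int × List Int)
    (hs : s < b) (hm : pvM mylist pv.1 s = true) (hmin : ∀ t < s, pvM mylist pv.1 t = false) :
    pvRef mylist (pv :: rest) (List.range b) r = pvRef mylist rest (List.range s) (pvMk pv s) := by
  rcases hf : (List.range s).find? (fun i => rest.any (fun q => pvM mylist q.1 i)) with _ | i
  · have hno : ∀ t < s, rest.any (fun q => pvM mylist q.1 t) = false :=
      (pv_find?_range_none _ _).mp hf
    have houter : (List.range b).find? (fun i => (pv :: rest).any (fun q => pvM mylist q.1 i))
        = some s := by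
      refine (pv_find?_range_some _ _ s).mpr ⟨hs, by simp [List.any_cons, hm],
        fun t ht => by simp [List.any_cons, hmin t ht, hno t ht]⟩
    unfold pvRef
    simp only [houter, hf]
    rw [List.find?_cons_of_pos (p := fun q => pvM mylist q.1 s) (a := pv) (l := rest)
      (by simpa using hm)]
  · obtain ⟨his, hani, hmini⟩ := (pv_find?_range_some _ _ i).mp hf
    have houter : (List.range b).find? (fun i => (pv :: rest).any (fun q => pvM mylist q.1 i))
        = some i := by
      refine (pv_find?_range_some _ _ i).mpr ⟨by omega, by simp [List.any_cons, hani],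
        fun t ht => ?_⟩
      have h1 := hmin t (by omega)
      have h2 := hmini t ht
      simp [List.any_cons, h1, h2]
    have hpv : pvM mylist pv.1 i = false := hmin i his
    obtain ⟨q, hqmem, hq⟩ := List.any_eq_true.mp hani
    rcases hfr : rest.find? (fun qq => pvM mylist qq.1 i) with _ | qv
    · exfalso
      rw [List.find?_eq_none] at hfr
      exact absurd hq (by simpa using hfr q hqmem)
    · unfold pvRef
      simp only [houter, hf]
      rw [List.find?_cons_of_neg (p := fun q => pvM mylist q.1 i) (a := pv) (l := rest)
        (by simp [hpv]), hfr]

lemma pv_b_loop (mylist : List Int) :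
    ∀ (d : List (List Int × List Int)) (b : Nat) (r : List Int × List Int),
    (d.foldl
      (fun acc pv =>
        match (List.range acc.1).find?
            (fun (s : Nat) => PySem.List.slice mylist (some (s : Int)) (some ((s : Int) + (pv.1.length : Int))) == pv.1) with
        | some s => (s, (PySem.List.pyRange (s : Int) ((s : Int) + (pv.1.length : Int)) 1, pv.2))
        | none => acc)
      (b, r)).2 = pvRef mylist d (List.range b) r := by
  intro d
  induction d with
  | nil =>
    intro b r
    have h0 : (List.range b).find? (fun i => ([] : List (List Int × List Int)).any
        (fun pv => pvM mylist pv.1 i)) = none := by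
      rw [List.find?_eq_none]; intro x _; simp
    simp only [List.foldl_nil, pvRef, h0]
  | cons pv rest ih =>
    intro b r
    rw [List.foldl_cons]
    rw [show
      (fun (s : Nat) => PySem.List.slice mylist (some (s : Int)) (some ((s : Int) + (pv.1.length : Int))) == pv.1)
        = pvM mylist pv.1 from pv_slice_pred mylist pv.1]
    rcases hf : (List.range b).find? (pvM mylist pv.1) with _ | s
    · have hno := (pv_find?_range_none _ _).mp hf
      simpa [hf] using (ih b r).trans (pvRef_cons_none mylist pv rest b r hno).symm
    · obtain ⟨hs, hm, hmin⟩ := (pv_find?_range_some _ _ s).mp hf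
      simpa [hf] using (ih s (pvMk pv s)).trans (pvRef_cons_some mylist pv rest b s r hs hm hmin).symm

lemma pv_dict_first (p : List Int → Bool) :
    ∀ (full : List (List Int × List Int)) pv, full.find? (fun q => p q.1) = some pv →
    PySem.Dict.get? ⟨full⟩ pv.1 = some pv.2 := by
  intro full
  induction full with
  | nil => simp
  | cons q rest ih =>
    intro pv h
    by_cases hq : p q.1 = true
    · rw [List.find?_cons_of_pos (p := fun q' => p q'.1) (a := q) (l := rest) hq] at h
      cases h
      simp [PySem.Dict.get?]
    · rw [List.find?_cons_of_neg (p := fun q' => p q'.1) (a := q) (l := rest)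
        (by simpa using hq)] at h
      have hp := List.find?_some h
      have hne : q.1 ≠ pv.1 := by
        intro he; rw [he] at hq; exact hq hp
      calc PySem.Dict.get? ⟨q :: rest⟩ pv.1
          = PySem.Dict.get? ⟨rest⟩ pv.1 := by
            simp [PySem.Dict.get?, List.find?_cons_of_neg, hne]
        _ = some pv.2 := ih pv h

lemma pv_a_inner_eq (mylist : List Int) (full : List (List Int × List Int))
    (j : Nat) (hj : j < mylist.length) :
    ∀ (d : List (List Int × List Int)),
    pvAInner mylist full ((j : Nat) : Int) d =
      match d.find? (fun pv => pvM mylist pv.1 j) with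
      | none => some none
      | some pv => if pv.1 = [] then none
          else some (some (PySem.List.pyRange ((j : Nat) : Int) (((j : Nat) : Int) + (pv.1.length : Int)) 1,
                           (PySem.Dict.get? ⟨full⟩ pv.1).getD [])) := by
  intro d
  induction d with
  | nil => simp [pvAInner]
  | cons pv rest ih =>
    rcases hp : pv.1 with _ | ⟨h0, tl⟩
    · have hm : pvM mylist pv.1 j = true := by simp [pvM, hp]
      rw [List.find?_cons_of_pos (p := fun q => pvM mylist q.1 j) (a := pv) (l := rest) hm]
      simp [pvAInner, hp, PySem.List.pyGet?, PySem.List.pyIdx?]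
    · have hget0 : PySem.List.pyGet? pv.1 0 = some h0 := by
        simp [hp, PySem.List.pyGet?, PySem.List.pyIdx?]
      have hgetj : PySem.List.pyGet? mylist ((j : Nat) : Int) = some mylist[j] := by
        simp [PySem.List.pyGet?_natCast, List.getElem?_eq_getElem hj]
      have hslice : PySem.List.slice mylist (some ((j : Nat) : Int))
          (some (((j : Nat) : Int) + (pv.1.length : Int)))
          = (mylist.drop j).take pv.1.length := PySem.List.slice_natCast_add mylist j pv.1.length
      by_cases hm : pvM mylist pv.1 j = true
      · have heq : (mylist.drop j).take pv.1.length = pv.1 := by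
          simpa [pvM] using hm
        have hx : mylist[j] = h0 := by
          rcases hd : mylist.drop j with _ | ⟨a, t⟩
          · rw [hd] at heq; rw [hp] at heq; simp at heq
          · have ha : a = h0 := by
              rw [hd, hp] at heq
              rcases hl : pv.1.length with _ | m
              · rw [hp] at hl; simp at hl
              · rw [hp] at hl
                rw [hl] at heq
                simp [List.take_succ_cons] at heq
                exact heq.1
            have : mylist[j]? = some a := by
              have := @List.getElem?_drop Int mylist j 0
              rw [hd] at this
              simpa using this.symm
            rw [List.getElem?_eq_getElem hj] at this
            cases this
            exact ha
        rw [List.find?_cons_of_pos (p := fun q => pvM mylist q.1 j) (a := pv) (l := rest) hm]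
        unfold pvAInner
        simp only [hget0, hgetj]
        rw [if_pos hx, hslice, if_pos heq]
        simp [hp]
      · have hm' : pvM mylist pv.1 j = false := by simpa using hm
        have hne : (mylist.drop j).take pv.1.length ≠ pv.1 := by
          simpa [pvM] using hm
        rw [List.find?_cons_of_neg (p := fun q => pvM mylist q.1 j) (a := pv) (l := rest)
          (by simp [hm'])]
        unfold pvAInner
        simp only [hget0, hgetj]
        rw [hslice]
        by_cases hx : mylist[j] = h0
        · rw [if_pos hx, if_neg hne]
          exact ih
        · rw [if_neg hx]
          exact ih

lemma pv_a_outer_eq (mylist : List Int) (full : List (List Int × List Int))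
    (hsafe : ∀ (j : Nat), j < mylist.length → ∀ pv,
      full.find? (fun q => pvM mylist q.1 j) = some pv → pv.1 ≠ []) :
    ∀ (k j : Nat), j + k = mylist.length →
    pvAOuter mylist full ((List.range' j k).map (fun (t : Nat) => (t : Int)))
      = some (pvRef mylist full (List.range' j k) ([], [])) := by
  intro k
  induction k with
  | zero => intro j _; simp [List.range'_zero, pvAOuter, pvRef]
  | succ k ih =>
    intro j hjk
    have hj : j < mylist.length := by omega
    rw [List.range'_succ]
    simp only [List.map_cons]
    have hinner := pv_a_inner_eq mylist full j hj full
    rcases hfull : full.find? (fun q => pvM mylist q.1 j) with _ | pv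
    · simp only [hfull] at hinner
      have hanyf : full.any (fun q => pvM mylist q.1 j) = false := by
        rcases hany : full.any (fun q => pvM mylist q.1 j) with _ | _
        · rfl
        · obtain ⟨q, hqm, hq⟩ := List.any_eq_true.mp hany
          rw [List.find?_eq_none] at hfull
          exact absurd hq (by simpa using hfull q hqm)
      have hih := ih (j + 1) (by omega)
      unfold pvAOuter
      simp only [hinner]
      rw [hih]
      unfold pvRef
      rw [List.find?_cons_of_neg (p := fun i => full.any fun pv => pvM mylist pv.1 i)
        (a := j) (l := List.range' (j + 1) k) (by simp [hanyf])]
    · simp only [hfull] at hinner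
      have hnem : pv.1 ≠ [] := hsafe j hj pv hfull
      rw [if_neg hnem] at hinner
      have hany : full.any (fun q => pvM mylist q.1 j) = true :=
        List.any_eq_true.mpr ⟨pv, List.mem_of_find?_eq_some hfull,
          by simpa using List.find?_some hfull⟩
      unfold pvAOuter
      simp only [hinner]
      unfold pvRef
      rw [List.find?_cons_of_pos (p := fun i => full.any fun pv => pvM mylist pv.1 i)
        (a := j) (l := List.range' (j + 1) k) hany]
      simp only [hfull]
      rw [pv_dict_first (fun q => pvM mylist q j) full pv hfull]
      simp [pvMk]

lemma pv_prefix_M0 (mylist : List Int) (q : List Int) (h : q.isPrefixOf mylist = true) :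
    pvM mylist q 0 = true := by
  have := List.isPrefixOf_iff_prefix.mp h
  have := List.prefix_iff_eq_take.mp this
  simp [pvM, ← this]

lemma pv_find?_early (mylist : List Int) :
    ∀ (l : List (List Int × List Int)),
    (∃ q ∈ l.takeWhile (fun q => !q.1.isEmpty), q.1.isPrefixOf mylist = true) →
    ∃ pv, l.find? (fun q => pvM mylist q.1 0) = some pv ∧ pv.1 ≠ [] := by
  intro l
  induction l with
  | nil => rintro ⟨q, hq, _⟩; simp at hq
  | cons x rest ih =>
    rintro ⟨q, hq, hpref⟩
    by_cases hx : x.1 = []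
    · rw [List.takeWhile_cons_of_neg (by simp [hx])] at hq
      simp at hq
    · rw [List.takeWhile_cons_of_pos (by simpa using hx)] at hq
      by_cases hxm : pvM mylist x.1 0 = true
      · exact ⟨x, List.find?_cons_of_pos hxm, hx⟩
      · rcases List.mem_cons.mp hq with rfl | hq'
        · exact absurd (pv_prefix_M0 mylist q.1 hpref) hxm
        · obtain ⟨pv, hf, hne⟩ := ih ⟨q, hq', hpref⟩
          refine ⟨pv, ?_, hne⟩
          rw [List.find?_cons_of_neg (p := fun q => pvM mylist q.1 0) (a := x) (l := rest)
            (by simpa using hxm)]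
          exact hf

lemma pv_B_is_ref (mylist : List Int) (opt_dict : List (List Int × List Int)) :
    sublist_finder_alt mylist opt_dict
      = pvRef mylist opt_dict (List.range mylist.length) ([], []) := by
  unfold sublist_finder_alt
  exact pv_b_loop mylist opt_dict mylist.length ([], [])

lemma pv_range_cast (n : Nat) :
    PySem.List.pyRange 0 (n : Int) 1 = (List.range' 0 n).map (fun t : Nat => (t : Int)) := by
  rw [PySem.List.pyRange_one]
  simp [← List.range_eq_range']

-- ===== VERDICT (by name: the statement is the Claim_ definition above) =====
theorem sublist_finder_spec : Claim_equal_sublist_finder := by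
  intro mylist opt_dict _ hpre
  unfold Spec_sublist_finder
  rw [pv_B_is_ref]
  rcases hpre with hml | hne | hearly
  · subst hml
    simp [sublist_finder, pvAOuter, PySem.List.pyRange_one_eq_nil (le_refl (0 : Int)), pvRef]
  · have hsafe : ∀ (j : Nat), j < mylist.length → ∀ pv,
        opt_dict.find? (fun q => pvM mylist q.1 j) = some pv → pv.1 ≠ [] := by
      intro j _ pv hf
      exact hne pv (List.mem_of_find?_eq_some hf)
    unfold sublist_finder
    rw [pv_range_cast, pv_a_outer_eq mylist opt_dict hsafe mylist.length 0 (by omega)]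
    rw [List.range_eq_range']
    rfl
  · obtain ⟨pv0, hf0, hne0⟩ := pv_find?_early mylist opt_dict (by
      obtain ⟨q, hqm, hqp⟩ := List.any_eq_true.mp hearly
      exact ⟨q, hqm, hqp⟩)
    have hml : mylist ≠ [] := by
      obtain ⟨q, hqm, hqp⟩ := List.any_eq_true.mp hearly
      have hqne : q.1 ≠ [] := by
        have := List.mem_takeWhile_imp hqm
        simpa using this
      intro h
      rw [h] at hqp
      have := List.isPrefixOf_iff_prefix.mp hqp
      exact hqne (List.prefix_nil.mp this)
    have hn : 0 < mylist.length := List.length_pos_iff.mpr hml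
    have hinner := pv_a_inner_eq mylist opt_dict 0 hn opt_dict
    simp only [hf0] at hinner
    rw [if_neg hne0] at hinner
    have hany0 : opt_dict.any (fun q => pvM mylist q.1 0) = true :=
      List.any_eq_true.mpr ⟨pv0, List.mem_of_find?_eq_some hf0,
        by simpa using List.find?_some hf0⟩
    have houter : (List.range mylist.length).find?
        (fun i => opt_dict.any (fun pv => pvM mylist pv.1 i)) = some 0 :=
      (pv_find?_range_some _ _ 0).mpr ⟨hn, hany0, by omega⟩
    unfold sublist_finder
    simp only [Nat.cast_zero] at hinner
    rw [PySem.List.pyRange_one_cons (by exact_mod_cast hn)]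
    unfold pvAOuter
    simp only [hinner]
    unfold pvRef
    simp only [houter, hf0]
    rw [pv_dict_first (fun q => pvM mylist q 0) opt_dict pv0 hf0]
    simp [pvMk]
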